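-- pv_equiv track=rewrite | github.com/Liri3d/PortraitSemObj | regex.py | find_inner_expressions
-- ===== SOURCE A (Python) =====
-- def find_inner_expressions(expr):
--     """ Находит все подвыражения с вертикальной чертой, включая вложенные. """
--     stack = []
--     inner_expressions = []
--     for i, char in enumerate(expr):
--         if char == '(':
--             stack.append(i)
--         elif char == ')':
--             if stack:
--                 start = stack.pop()
--                 if '|' in expr[start:i]:  # Проверяем наличие вертикальной черты
--                     inner_expressions.append(expr[start + 1:i])  # Добавляем содержимое без скобок
--     return inner_expressions
-- ===== SOURCE B (Python) =====
-- def find_inner_expressions(expr):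
--     """Staged passes: (1) prefix counts of '|'; (2) matched paren pairs in
--     close order; (3) keep the pairs whose interior gained a pipe and cut
--     out their contents. No substring rescanning."""
--     # pass 1: pre[k] = number of '|' among expr[:k]
--     pre = [0]
--     t = 0
--     for c in expr:
--         if c == '|':
--             t += 1
--         pre.append(t)
--     # pass 2: matched pairs (open index, close index) in order of closing
--     stack = []
--     pairs = []
--     for i, c in enumerate(expr):
--         if c == '(':
--             stack.append(i)
--         elif c == ')':
--             if stack:
--                 pairs.append((stack.pop(), i))
--     # pass 3: select and render
--     return [expr[s + 1:e] for (s, e) in pairs if pre[s] < pre[e]]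
-- ===== Notes on version B (the rewrite author's own statement) =====
-- stated objective: alternative
-- what changed: B replaces A's single stack pass with substring rescans at every closing paren by three staged passes: a prefix-sum list of pipe counts, a pass collecting matched paren pairs, and a comprehension that filters pairs by comparing two prefix counts and slices their contents.
import Mathlib
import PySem

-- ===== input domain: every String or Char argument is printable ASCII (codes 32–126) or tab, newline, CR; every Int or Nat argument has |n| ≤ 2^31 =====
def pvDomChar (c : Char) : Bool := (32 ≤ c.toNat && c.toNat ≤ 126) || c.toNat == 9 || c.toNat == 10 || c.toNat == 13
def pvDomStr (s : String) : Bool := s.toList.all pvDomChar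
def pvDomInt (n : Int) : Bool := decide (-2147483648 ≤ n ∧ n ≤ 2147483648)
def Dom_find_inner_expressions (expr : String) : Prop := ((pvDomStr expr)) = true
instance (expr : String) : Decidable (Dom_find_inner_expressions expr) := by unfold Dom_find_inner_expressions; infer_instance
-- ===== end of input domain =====

-- B replaces A's single stack pass with substring rescans by three staged
-- passes: a prefix-sum list of '|' counts, a pass collecting matched paren
-- pairs, and a final filter-and-slice over the pairs (objective: alternative).

-- ===== PORT A =====
-- one loop step of A: state = (stack of '(' indices, collected results)
def pvStepA (cs : List Char) (st : List Int × List String) (p : Int × Char) :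
    List Int × List String :=
  if p.2 = '(' then (p.1 :: st.1, st.2)
  else if p.2 = ')' then
    match st.1 with
    | [] => st
    | start :: rest =>
      if '|' ∈ PySem.List.slice cs (some start) (some p.1) then
        (rest, st.2 ++ [String.ofList (PySem.List.slice cs (some (start + 1)) (some p.1))])
      else (rest, st.2)
  else st

def find_inner_expressions (expr : String) : List String :=
  ((PySem.List.enumerate expr.toList 0).foldl (pvStepA expr.toList) ([], [])).2

-- ===== PORT B =====
-- pass 1 step: t += (c == '|'); pre.append(t)   (state = (pre, t))
def pvPreStep (st : List Int × Int) (c : Char) : List Int × Int :=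
  let t := st.2 + (if c = '|' then 1 else 0)
  (st.1 ++ [t], t)

-- pass 2 step: collect matched pairs (open index, close index) in close order
def pvPairStep (st : List Int × List (Int × Int)) (p : Int × Char) :
    List Int × List (Int × Int) :=
  if p.2 = '(' then (p.1 :: st.1, st.2)
  else if p.2 = ')' then
    match st.1 with
    | [] => st
    | s :: rest => (rest, st.2 ++ [(s, p.1)])
  else st

-- pass 3: Source B's final comprehension. Python's pre[s] / pre[e] raise only out
-- of range; here s < e < |pre| always holds, so List.getD is exact for them.
def pvRender (cs : List Char) (pairs : List (Int × Int)) : List String :=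
  let pre := (cs.foldl pvPreStep ([(0 : Int)], 0)).1
  (pairs.filter (fun q => pre.getD q.1.toNat 0 < pre.getD q.2.toNat 0)).map
    (fun q => String.ofList (PySem.List.slice cs (some (q.1 + 1)) (some q.2)))

def find_inner_expressions_alt (expr : String) : List String :=
  pvRender expr.toList
    (((PySem.List.enumerate expr.toList 0).foldl pvPairStep ([], [])).2)

-- ===== PRECONDITION & SPEC =====
def Spec_find_inner_expressions (expr : String) (out : List String) : Prop := out = find_inner_expressions_alt expr
instance (expr : String) (out : List String) : Decidable (Spec_find_inner_expressions expr out) := by unfold Spec_find_inner_expressions; infer_instance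

-- ===== CLAIM (what is proved, stated in full; the proofs are below) =====
def Claim_equal_find_inner_expressions : Prop := ∀ (expr : String), Dom_find_inner_expressions expr → Spec_find_inner_expressions expr (find_inner_expressions expr)

-- ===== LEMMAS AND PROOFS =====

-- number of '|' among the first s characters, as a Python int
def pvPc (cs : List Char) (s : Nat) : Int := ((cs.take s).count '|' : Int)

-- characterization of pass 1's fold
lemma pvPre_char (cs : List Char) : ∀ (acc : List Int) (t : Int),
    (cs.foldl pvPreStep (acc, t)).1
      = acc ++ (List.range cs.length).map (fun k => t + (((cs.take (k + 1)).count '|' : Nat) : Int)) := by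
  induction cs with
  | nil => intro acc t; simp
  | cons c cs ih =>
    intro acc t
    simp only [List.foldl_cons, pvPreStep]
    rw [ih]
    rw [List.length_cons, List.range_succ_eq_map]
    simp only [List.map_cons, List.map_map, List.append_assoc]
    congr 1
    · simp [List.count_cons]
      intro a _
      ring

lemma pvPre_getD (cs : List Char) (k : Nat) (hk : k ≤ cs.length) :
    ((cs.foldl pvPreStep ([(0 : Int)], 0)).1).getD k 0 = pvPc cs k := by
  rw [pvPre_char]
  cases k with
  | zero => simp [pvPc]
  | succ k =>
    have hk' : k < cs.length := by omega
    have : ([(0 : Int)] ++ (List.range cs.length).map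
        (fun k => (0 : Int) + (((cs.take (k + 1)).count '|' : Nat) : Int))).getD (k + 1) 0
        = ((List.range cs.length).map
        (fun k => (0 : Int) + (((cs.take (k + 1)).count '|' : Nat) : Int))).getD k 0 := by
      simp [List.getD]
    rw [this, List.getD_eq_getElem _ _ (by simpa using hk')]
    simp [pvPc]

-- the key equivalence: '|' occurs in cs[k:s] iff the pipe count strictly grew
lemma pvMem_iff (cs : List Char) (k s : Nat) (hks : k ≤ s) :
    ('|' ∈ PySem.List.slice cs (some (k : Int)) (some (s : Int))) ↔ pvPc cs k < pvPc cs s := by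
  rw [PySem.List.slice_natCast]
  have hsplit : cs.take s = cs.take k ++ ((cs.drop k).take (s - k)) := by
    have hadd : k + (s - k) = s := by omega
    have h2 : cs.take (k + (s - k)) = cs.take k ++ ((cs.drop k).take (s - k)) := by
      rw [List.take_add]
    rw [hadd] at h2; exact h2
  have hcount : (cs.take s).count '|' = (cs.take k).count '|' + ((cs.drop k).take (s - k)).count '|' := by
    rw [hsplit, List.count_append]
  constructor
  · intro hmem
    have := List.count_pos_iff.mpr hmem
    simp [pvPc]; omega
  · intro hlt
    have : 0 < ((cs.drop k).take (s - k)).count '|' := by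
      simp [pvPc] at hlt; omega
    exact List.count_pos_iff.mp this

-- the renderer distributes over appended pairs
lemma pvRender_append (cs : List Char) (pr qs : List (Int × Int)) :
    pvRender cs (pr ++ qs) = pvRender cs pr ++ pvRender cs qs := by
  simp [pvRender, List.filter_append]

-- filter condition of one in-range pair = A's membership test
lemma pvRender_single (cs : List Char) (k s : Nat) (hks : k ≤ s) (hs : s ≤ cs.length) :
    pvRender cs [((k : Int), (s : Int))]
      = if '|' ∈ PySem.List.slice cs (some (k : Int)) (some (s : Int))
        then [String.ofList (PySem.List.slice cs (some ((k : Int) + 1)) (some (s : Int)))]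
        else [] := by
  have h1 := pvPre_getD cs k (le_trans hks hs)
  have h2 := pvPre_getD cs s hs
  have hmem := pvMem_iff cs k s hks
  by_cases hc : '|' ∈ PySem.List.slice cs (some (k : Int)) (some (s : Int))
  · have hlt : ((cs.foldl pvPreStep ([(0 : Int)], 0)).1).getD ((k : Int)).toNat 0
        < ((cs.foldl pvPreStep ([(0 : Int)], 0)).1).getD ((s : Int)).toNat 0 := by
      simp only [Int.toNat_natCast, h1, h2]
      exact hmem.mp hc
    rw [if_pos hc]
    simp only [pvRender, List.filter, decide_eq_true hlt, List.map]
  · have hge : ¬ ((cs.foldl pvPreStep ([(0 : Int)], 0)).1).getD ((k : Int)).toNat 0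
        < ((cs.foldl pvPreStep ([(0 : Int)], 0)).1).getD ((s : Int)).toNat 0 := by
      simp only [Int.toNat_natCast, h1, h2]
      exact fun h => hc (hmem.mpr h)
    rw [if_neg hc]
    simp only [pvRender, List.filter, decide_eq_false hge, List.map]

-- simulation invariant: A's running output = renderer applied to B's pairs
lemma pvSim (cs : List Char) (ds : List Char) :
    ∀ (s : Nat) (stk : List Int) (out : List String) (pr : List (Int × Int)),
    cs.drop s = ds →
    (∀ j ∈ stk, ∃ k : Nat, j = (k : Int) ∧ k ≤ s) →
    out = pvRender cs pr →
    ((PySem.List.enumerate ds (s : Int)).foldl (pvStepA cs) (stk, out)).2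
      = pvRender cs ((PySem.List.enumerate ds (s : Int)).foldl pvPairStep (stk, pr)).2 := by
  induction ds with
  | nil => intro s stk out pr _ _ hout; simpa [PySem.List.enumerate_nil] using hout
  | cons d ds ih =>
    intro s stk out pr hdrop hstk hout
    have hs : s < cs.length := by
      by_contra hge
      simp [List.drop_eq_nil_of_le (Nat.le_of_not_lt hge)] at hdrop
    have hdrop' : cs.drop (s + 1) = ds := by
      have := congrArg (List.drop 1) hdrop
      simpa [List.drop_drop, Nat.add_comm] using this
    rw [PySem.List.enumerate_cons]
    simp only [List.foldl_cons]
    rw [show ((s : Int) + 1) = ((s + 1 : Nat) : Int) by push_cast; ring]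
    by_cases h1 : d = '('
    · simp only [pvStepA, pvPairStep, h1]
      apply ih (s + 1) ((s : Int) :: stk) out pr hdrop' _ hout
      intro j hj
      rcases List.mem_cons.mp hj with hj | hj
      · exact ⟨s, hj, by omega⟩
      · obtain ⟨k, hk1, hk2⟩ := hstk j hj; exact ⟨k, hk1, by omega⟩
    · by_cases h2 : d = ')'
      · cases stk with
        | nil =>
          simp only [pvStepA, pvPairStep, h2]
          apply ih (s + 1) [] out pr hdrop' (by intro j hj; simp at hj) hout
        | cons start rest =>
          obtain ⟨k, hk1, hk2⟩ := hstk start (by simp)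
          have hsingle := pvRender_single cs k s hk2 (Nat.le_of_lt hs)
          have hrest : ∀ j ∈ rest, ∃ k' : Nat, j = (k' : Int) ∧ k' ≤ s + 1 := by
            intro j hj
            obtain ⟨k', hk'1, hk'2⟩ := hstk j (by simp [hj])
            exact ⟨k', hk'1, by omega⟩
          simp only [pvStepA, pvPairStep, h2]
          by_cases hc : '|' ∈ PySem.List.slice cs (some start) (some (s : Int))
          · rw [if_pos hc]
            apply ih (s + 1) rest _ _ hdrop' hrest
            rw [hout, pvRender_append]
            subst hk1
            rw [hsingle, if_pos hc]
          · rw [if_neg hc]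
            apply ih (s + 1) rest _ _ hdrop' hrest
            rw [hout, pvRender_append]
            subst hk1
            rw [hsingle, if_neg hc]
            simp
      · simp only [pvStepA, pvPairStep, if_neg h1, if_neg h2]
        apply ih (s + 1) stk out pr hdrop' _ hout
        intro j hj
        obtain ⟨k', hk'1, hk'2⟩ := hstk j hj
        exact ⟨k', hk'1, by omega⟩

-- ===== VERDICT (by name: the statement is the Claim_ definition above) =====
theorem find_inner_expressions_spec : Claim_equal_find_inner_expressions := by
  intro expr _
  unfold Spec_find_inner_expressions find_inner_expressions find_inner_expressions_alt
  have h := pvSim expr.toList expr.toList 0 [] [] [] (by simp) (by simp)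
    (by simp [pvRender])
  simpa using h
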